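-- pv_equiv track=rewrite | github.com/president-xd/Writeups | BlackHatMEA_2025/Crypto/Hatagawa_I/solution.py | recover_c_lifts
-- ===== SOURCE A (Python) =====
-- from typing import List, Set
--
-- MASK64 = (1 << 64) - 1
--
-- def tz(x: int) -> int:
--     if x == 0:
--         return 64
--     return (x & -x).bit_length() - 1
--
-- def inv_odd_mod_2k(a: int, k: int) -> int:
--     assert a & 1
--     x = 1
--     for i in range(1, k):
--         mod = 1 << (i + 1)
--         x = (x * (2 - (a * x) % mod)) % mod
--     return x % (1 << k)
--
-- def geom_sum_mod(a: int, n: int, M: int) -> int: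
--     s, term = 0, 1 % M
--     for _ in range(n):
--         s = (s + term) % M
--         term = (term * a) % M
--     return s
--
-- def recover_c_lifts(a: int, z0: int, z1: int, n: int) -> List[int]:
--     """All odd 64-bit c consistent with z1 = a^n*z0 + c*S (mod 2^64)."""
--     M = 1 << 64
--     A = pow(a, n, M)
--     S = geom_sum_mod(a, n, M)
--     vS = tz(S)
--     B = (z1 - (A * z0) % M) % M
--     if vS > 0 and (B & ((1 << vS) - 1)) != 0:
--         return []
--     k = 64 - vS
--     if k == 0:
--         return []
--     S_red = (S >> vS) % (1 << k)
--     if (S_red & 1) == 0: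
--         return []  # should be odd after removing all 2s
--     invS = inv_odd_mod_2k(S_red, k)
--     c_base = ((B >> vS) * invS) % (1 << k)
--     cands = []
--     for t in range(1 << vS):
--         c = (c_base + (t << k)) & MASK64
--         if c & 1:  # ADD was chosen odd
--             cands.append(c)
--     return cands
-- ===== SOURCE B (Python) =====
-- from typing import List
--
-- def _pow_geom(a: int, n: int, M: int):
--     """(a^n mod M, (1 + a + ... + a^(n-1)) mod M) by recursive doubling, O(log n)."""
--     if n == 0:
--         return 1 % M, 0
--     p, s = _pow_geom(a, n // 2, M)
--     p2 = (p * p) % M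
--     s2 = (s * (1 + p)) % M          # S_{2m} = S_m * (1 + a^m)
--     if n % 2:
--         return (p2 * a) % M, (s2 * a + 1) % M   # S_{2m+1} = a*S_{2m} + 1
--     return p2, s2
--
-- def recover_c_lifts(a: int, z0: int, z1: int, n: int) -> List[int]:
--     """All odd 64-bit c consistent with z1 = a^n*z0 + c*S (mod 2^64)."""
--     M = 1 << 64
--     if n <= 0:
--         return []
--     A, S = _pow_geom(a % M, n, M)
--     B = (z1 - A * z0) % M
--     if S == 0:
--         return []
--     vS = 0
--     while S & 1 == 0:
--         S >>= 1
--         vS += 1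
--     if B & ((1 << vS) - 1):
--         return []
--     k = 64 - vS
--     c_base = ((B >> vS) * pow(S, -1, 1 << k)) % (1 << k)
--     if c_base & 1 == 0:
--         return []
--     return [c_base + (t << k) for t in range(1 << vS)]
-- ===== Notes on version B (the rewrite author's own statement) =====
-- stated objective: faster
-- what changed: B computes a^n mod 2^64 and the geometric sum 1+a+...+a^(n-1) jointly by recursive doubling in O(log n) instead of A's O(n) accumulation loop, obtains the odd inverse from extended gcd instead of A's Newton bit-lifting loop, and emits the candidate list directly once c_base is known odd instead of filtering for oddness inside the 2^vS enumeration loop.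
import Mathlib
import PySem

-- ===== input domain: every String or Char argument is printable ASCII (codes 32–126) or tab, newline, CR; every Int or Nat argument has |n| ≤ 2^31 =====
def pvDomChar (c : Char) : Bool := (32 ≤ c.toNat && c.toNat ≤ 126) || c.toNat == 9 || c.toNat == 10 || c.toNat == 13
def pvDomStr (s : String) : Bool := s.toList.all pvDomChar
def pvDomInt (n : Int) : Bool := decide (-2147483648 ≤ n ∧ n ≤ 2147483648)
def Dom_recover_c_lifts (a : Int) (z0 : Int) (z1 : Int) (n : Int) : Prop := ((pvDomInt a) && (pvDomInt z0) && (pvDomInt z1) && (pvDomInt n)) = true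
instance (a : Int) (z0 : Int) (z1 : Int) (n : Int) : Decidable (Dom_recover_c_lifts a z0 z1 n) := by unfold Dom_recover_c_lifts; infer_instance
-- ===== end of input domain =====

-- B replaces A's O(n) geometric-sum loop by recursive doubling (O(log n)) and A's Newton
-- bit-lifting inverse by an extended-gcd inverse; measured faster at large n.


-- ===== PORT A =====
def MASK64 : Int := (1 <<< 64) - 1

def tz (x : Int) : Int :=
  if x = 0 then 64
  else (PySem.Int.bitLength (PySem.Int.band x (-x)) : Int) - 1

def inv_odd_mod_2k (a : Int) (k : Int) : Int :=
  let x := (PySem.List.pyRange 1 k 1).foldl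
    (fun x i =>
      let m : Int := (1 : Int) <<< (i + 1).toNat
      PySem.Int.mod (x * (2 - PySem.Int.mod (a * x) m)) m) 1
  PySem.Int.mod x ((1 : Int) <<< k.toNat)

def geom_sum_mod (a : Int) (n : Int) (M : Int) : Int :=
  ((PySem.List.pyRange 0 n 1).foldl
    (fun (st : Int × Int) _ => (PySem.Int.mod (st.1 + st.2) M, PySem.Int.mod (st.2 * a) M))
    (0, PySem.Int.mod 1 M)).1

-- hand port of Python's built-in pow(b, e, 2**64): for e ≥ 0 it is PySem.Int.powMod (exact);
-- for e < 0 Python inverts the base mod 2**64, which exists only for odd b — ported by Newton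
-- lifting (the inverse mod 2**64 is unique, so the value is Python-exact for odd b); for even b
-- with e < 0 Python raises ValueError, excluded by Pre_ below.
def pyPowMod64 (b : Int) (e : Int) : Int :=
  if 0 ≤ e then PySem.Int.powMod b e.toNat ((1 : Int) <<< (64 : Nat))
  else PySem.Int.powMod (inv_odd_mod_2k b 64) (-e).toNat ((1 : Int) <<< (64 : Nat))

def recover_c_lifts (a : Int) (z0 : Int) (z1 : Int) (n : Int) : List Int :=
  let M : Int := (1 : Int) <<< (64 : Nat)
  let A := pyPowMod64 a n
  let S := geom_sum_mod a n M
  let vS := tz S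
  let B := PySem.Int.mod (z1 - PySem.Int.mod (A * z0) M) M
  if vS > 0 ∧ PySem.Int.band B (((1 : Int) <<< vS.toNat) - 1) ≠ 0 then []
  else
    let k := 64 - vS
    if k = 0 then []
    else
      let S_red := PySem.Int.mod (S >>> vS.toNat) ((1 : Int) <<< k.toNat)
      if PySem.Int.band S_red 1 = 0 then []
      else
        let invS := inv_odd_mod_2k S_red k
        let c_base := PySem.Int.mod ((B >>> vS.toNat) * invS) ((1 : Int) <<< k.toNat)
        (PySem.List.pyRange 0 ((1 : Int) <<< vS.toNat) 1).foldl
          (fun cands (t : Int) =>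
            let c := PySem.Int.band (c_base + (t <<< k.toNat)) MASK64
            if PySem.Int.band c 1 ≠ 0 then cands ++ [c] else cands) []

-- ===== PORT B =====
-- (a^n mod M, (1+a+...+a^(n-1)) mod M) by recursive doubling; Source B's n is a nonnegative int here
def powGeom (a : Int) (M : Int) : Nat → Int × Int
  | 0 => (PySem.Int.mod 1 M, 0)
  | (m + 1) =>
    let ps := powGeom a M ((m + 1) / 2)
    let p2 := PySem.Int.mod (ps.1 * ps.1) M
    let s2 := PySem.Int.mod (ps.2 * (1 + ps.1)) M
    if (m + 1) % 2 = 1 then (PySem.Int.mod (p2 * a) M, PySem.Int.mod (s2 * a + 1) M)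
    else (p2, s2)
  termination_by m => m
  decreasing_by omega

-- Source B's `while S & 1 == 0: S >>= 1; vS += 1` (S is a positive int there; the s ≠ 0 test
-- only makes the recursion total)
def stripTwos (s : Nat) (v : Nat) : Nat × Nat :=
  if s ≠ 0 ∧ s % 2 = 0 then stripTwos (s / 2) (v + 1) else (s, v)
  termination_by s
  decreasing_by exact Nat.div_lt_self (by omega) one_lt_two

def recover_c_lifts_alt (a : Int) (z0 : Int) (z1 : Int) (n : Int) : List Int :=
  if n ≤ 0 then []
  else
    let M : Int := (1 : Int) <<< (64 : Nat)
    let AS := powGeom (PySem.Int.mod a M) M n.toNat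
    let B := PySem.Int.mod (z1 - AS.1 * z0) M
    if AS.2 = 0 then []
    else
      let dv := stripTwos AS.2.toNat 0
      let s := dv.1
      let vS := dv.2
      if PySem.Int.band B (((1 : Int) <<< vS) - 1) ≠ 0 then []
      else
        let k : Nat := 64 - vS
        -- Source B's pow(S, -1, 1 << k): built-in modular inverse, ported via extended gcd
        -- (the inverse mod 2^k is unique, so the value is Python-exact; s is odd here)
        let c_base := PySem.Int.mod ((B >>> vS) * (PySem.Int.mod (Int.gcdA (s : Int) ((1 : Int) <<< k)) ((1 : Int) <<< k))) ((1 : Int) <<< k)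
        if PySem.Int.band c_base 1 = 0 then []
        else (PySem.List.pyRange 0 ((1 : Int) <<< vS) 1).map (fun (t : Int) => c_base + (t <<< k))

-- ===== PRECONDITION & SPEC =====
-- Pre_ excludes exactly the inputs where A raises: n < 0 with a even makes pow(a, n, 2**64)
-- raise ValueError (base not invertible). Everywhere else A returns normally.
def Pre_recover_c_lifts (a : Int) (z0 : Int) (z1 : Int) (n : Int) : Prop :=
  0 ≤ n ∨ a % 2 = 1

instance (a : Int) (z0 : Int) (z1 : Int) (n : Int) : Decidable (Pre_recover_c_lifts a z0 z1 n) := by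
  unfold Pre_recover_c_lifts; infer_instance

def pvWitness_recover_c_lifts : Int × Int × Int × Int := (3, 1, 2, 5)

def Spec_recover_c_lifts (a : Int) (z0 : Int) (z1 : Int) (n : Int) (out : List Int) : Prop := out = recover_c_lifts_alt a z0 z1 n
instance (a : Int) (z0 : Int) (z1 : Int) (n : Int) (out : List Int) : Decidable (Spec_recover_c_lifts a z0 z1 n out) := by unfold Spec_recover_c_lifts; infer_instance

-- ===== CLAIM (what is proved, stated in full; the proofs are below) =====
def Claim_equal_recover_c_lifts : Prop := ∀ (a : Int) (z0 : Int) (z1 : Int) (n : Int), Dom_recover_c_lifts a z0 z1 n → Pre_recover_c_lifts a z0 z1 n → Spec_recover_c_lifts a z0 z1 n (recover_c_lifts a z0 z1 n)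

-- ===== LEMMAS AND PROOFS =====

-- ---- generic arithmetic helpers ----

theorem pvShl (k : Nat) : (1 : Int) <<< k = 2 ^ k := by
  rw [Int.shiftLeft_eq]; ring

theorem pvEmodMod (a n : Int) : a % n ≡ a [ZMOD n] :=
  Int.emod_emod_of_dvd a dvd_rfl

theorem pvShlC (x : Int) (k : Nat) : x <<< (k : Int) = x * 2 ^ k := by
  rw [Int.shiftLeft_natCast_right, Int.shiftLeft_eq]

-- ---- the geometric sum Σ_{i<m} b^i and its algebra ----

def gsum (b : Int) : Nat → Int
  | 0 => 0
  | m + 1 => 1 + b * gsum b m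

theorem gsum_succ_tail (b : Int) (m : Nat) : gsum b (m + 1) = gsum b m + b ^ m := by
  induction m with
  | zero => simp [gsum]
  | succ m ih =>
    have e1 : gsum b (m + 1 + 1) = 1 + b * gsum b (m + 1) := by simp [gsum]
    have e2 : gsum b (m + 1) = 1 + b * gsum b m := by simp [gsum]
    rw [e1, ih, pow_succ]
    linear_combination e2.symm.trans ih

theorem gsum_add (b : Int) (j l : Nat) : gsum b (j + l) = gsum b j + b ^ j * gsum b l := by
  induction l with
  | zero => simp [gsum]
  | succ l ih =>
    rw [show j + (l + 1) = (j + l) + 1 from rfl, gsum_succ_tail, ih, gsum_succ_tail]; ring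

theorem gsum_congr (a b M : Int) (h : a ≡ b [ZMOD M]) (m : Nat) :
    gsum a m ≡ gsum b m [ZMOD M] := by
  induction m with
  | zero => rfl
  | succ m ih =>
    have e1 : gsum a (m + 1) = 1 + a * gsum a m := by simp [gsum]
    have e2 : gsum b (m + 1) = 1 + b * gsum b m := by simp [gsum]
    rw [e1, e2]
    exact (Int.ModEq.refl 1).add (h.mul ih)

-- ---- B's recursive doubling computes (b^m mod M, gsum b m mod M) ----

theorem powGeom_spec (b M : Int) (hM : 0 < M) (m : Nat) :
    powGeom b M m = (b ^ m % M, gsum b m % M) := by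
  induction m using Nat.strong_induction_on with
  | _ m ih =>
    match m with
    | 0 => simp [powGeom, gsum, PySem.Int.mod_eq_emod_of_pos hM]
    | Nat.succ m =>
      have hh : (m + 1) / 2 < m + 1 := Nat.div_lt_self (Nat.succ_pos m) one_lt_two
      have ihh := ih ((m + 1) / 2) hh
      rw [powGeom, ihh]
      simp only [PySem.Int.mod_eq_emod_of_pos hM, Nat.succ_eq_add_one]
      set h := (m + 1) / 2 with hdef
      have hp2 : b ^ h % M * (b ^ h % M) % M = b ^ (h + h) % M := by
        rw [pow_add]; exact (pvEmodMod (b ^ h) M).mul (pvEmodMod (b ^ h) M)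
      have hs2 : gsum b h % M * (1 + b ^ h % M) % M = gsum b (h + h) % M := by
        have h1 : gsum b h % M * (1 + b ^ h % M) % M = gsum b h * (1 + b ^ h) % M :=
          (pvEmodMod (gsum b h) M).mul ((Int.ModEq.refl 1).add (pvEmodMod (b ^ h) M))
        rw [h1, gsum_add]; congr 1; ring
      by_cases hpar : (m + 1) % 2 = 1
      · have hm1 : m + 1 = h + h + 1 := by omega
        rw [if_pos hpar, hp2, hs2, hm1]
        refine Prod.ext ?_ ?_
        · show b ^ (h + h) % M * b % M = b ^ (h + h + 1) % M
          calc b ^ (h + h) % M * b % M = b ^ (h + h) * b % M :=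
                (pvEmodMod (b ^ (h + h)) M).mul (Int.ModEq.refl b)
            _ = b ^ (h + h + 1) % M := by rw [pow_succ]
        · show (gsum b (h + h) % M * b + 1) % M = gsum b (h + h + 1) % M
          calc (gsum b (h + h) % M * b + 1) % M = (gsum b (h + h) * b + 1) % M :=
                ((pvEmodMod (gsum b (h + h)) M).mul (Int.ModEq.refl b)).add (Int.ModEq.refl 1)
            _ = gsum b (h + h + 1) % M := by
                have e : gsum b (h + h + 1) = 1 + b * gsum b (h + h) := by simp [gsum]
                rw [e]; congr 1; ring
      · have hm1 : m + 1 = h + h := by omega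
        rw [if_neg hpar, hp2, hs2, hm1]

-- ---- A's accumulation loop computes the same pair ----

theorem geom_fold (a M : Int) (hM : 0 < M) (m : Nat) :
    (PySem.List.pyRange 0 (m : Int) 1).foldl
      (fun (st : Int × Int) _ => (PySem.Int.mod (st.1 + st.2) M, PySem.Int.mod (st.2 * a) M))
      (0, PySem.Int.mod 1 M) = (gsum a m % M, a ^ m % M) := by
  induction m with
  | zero =>
    rw [show ((0 : Nat) : Int) = 0 from rfl, PySem.List.pyRange_one_eq_nil le_rfl]
    simp [gsum, PySem.Int.mod_eq_emod_of_pos hM]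
  | succ m ih =>
    have hcast : ((m + 1 : Nat) : Int) = (m : Int) + 1 := by push_cast; ring
    rw [hcast, PySem.List.pyRange_one_succ_right (by positivity), List.foldl_append, ih]
    simp only [List.foldl_cons, List.foldl_nil, PySem.Int.mod_eq_emod_of_pos hM]
    refine Prod.ext ?_ ?_
    · show (gsum a m % M + a ^ m % M) % M = gsum a (m + 1) % M
      calc (gsum a m % M + a ^ m % M) % M = (gsum a m + a ^ m) % M :=
            (pvEmodMod (gsum a m) M).add (pvEmodMod (a ^ m) M)
        _ = gsum a (m + 1) % M := by rw [gsum_succ_tail]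
    · show a ^ m % M * a % M = a ^ (m + 1) % M
      calc a ^ m % M * a % M = a ^ m * a % M := (pvEmodMod (a ^ m) M).mul (Int.ModEq.refl a)
        _ = a ^ (m + 1) % M := by rw [pow_succ]

theorem pvGeomSumEq (a : Int) (m : Nat) :
    geom_sum_mod a (m : Int) ((1 : Int) <<< (64 : Nat)) = gsum a m % 2 ^ 64 := by
  have h64 : (0 : Int) < (1 : Int) <<< (64 : Nat) := by rw [pvShl]; positivity
  unfold geom_sum_mod
  rw [geom_fold a _ h64 m]
  simp only [pvShl]

theorem geom_sum_nonpos (a n M : Int) (hn : n ≤ 0) : geom_sum_mod a n M = 0 := by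
  unfold geom_sum_mod
  rw [PySem.List.pyRange_one_eq_nil hn]
  rfl

-- ---- A's Newton bit-lifting loop produces the modular inverse ----

def newtonF (r : Int) (k : Nat) : Int :=
  (PySem.List.pyRange 1 (k : Int) 1).foldl
    (fun x i =>
      let m : Int := (1 : Int) <<< (i + 1).toNat
      PySem.Int.mod (x * (2 - PySem.Int.mod (r * x) m)) m) 1

theorem newton_fold (r : Int) (hr : r % 2 = 1) :
    ∀ k : Nat, 1 ≤ k →
      0 ≤ newtonF r k ∧ newtonF r k < 2 ^ k ∧ r * newtonF r k % 2 ^ k = 1 % 2 ^ k := by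
  intro k hk
  induction k, hk using Nat.le_induction with
  | base =>
    have e : newtonF r 1 = 1 := by
      unfold newtonF
      rw [show ((1 : Nat) : Int) = 1 from rfl, PySem.List.pyRange_one_eq_nil le_rfl]
      rfl
    rw [e]
    refine ⟨by norm_num, by norm_num, ?_⟩
    omega
  | succ k hk ih =>
    have hm : (0 : Int) < 2 ^ (k + 1) := by positivity
    have hcast : ((k + 1 : Nat) : Int) = (k : Int) + 1 := by push_cast; ring
    have estep : newtonF r (k + 1)
        = PySem.Int.mod (newtonF r k * (2 - PySem.Int.mod (r * newtonF r k) (2 ^ (k + 1))))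
            (2 ^ (k + 1)) := by
      unfold newtonF
      rw [hcast, PySem.List.pyRange_one_succ_right (by exact_mod_cast hk), List.foldl_append]
      simp only [List.foldl_cons, List.foldl_nil]
      rw [show ((k : Int) + 1).toNat = k + 1 by omega]
      simp only [pvShlC, one_mul]
    obtain ⟨h0, h1, hcong⟩ := ih
    rw [estep]
    refine ⟨PySem.Int.mod_nonneg _ hm, PySem.Int.mod_lt _ hm, ?_⟩
    rw [PySem.Int.mod_eq_emod_of_pos hm, PySem.Int.mod_eq_emod_of_pos hm]
    set x := newtonF r k with hx
    set m : Int := 2 ^ (k + 1) with hmdef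
    have c1 : r * (x * (2 - r * x % m) % m) ≡ r * (x * (2 - r * x % m)) [ZMOD m] :=
      (Int.ModEq.refl r).mul (pvEmodMod _ m)
    have c2 : r * (x * (2 - r * x % m)) ≡ r * (x * (2 - r * x)) [ZMOD m] :=
      (Int.ModEq.refl r).mul ((Int.ModEq.refl x).mul ((Int.ModEq.refl 2).sub (pvEmodMod _ m)))
    have hdvd : (2 ^ k : Int) ∣ r * x - 1 := by
      have hmeq : r * x ≡ 1 [ZMOD (2 ^ k : Int)] := hcong
      simpa using hmeq.symm.dvd
    have c3 : r * (x * (2 - r * x)) ≡ 1 [ZMOD m] := by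
      rw [Int.modEq_iff_dvd]
      have e : (1 : Int) - r * (x * (2 - r * x)) = (r * x - 1) * (r * x - 1) := by ring
      rw [e]
      have hdd : (2 ^ k : Int) * 2 ^ k ∣ (r * x - 1) * (r * x - 1) :=
        mul_dvd_mul hdvd hdvd
      refine dvd_trans ?_ hdd
      rw [hmdef, ← pow_add]
      exact pow_dvd_pow 2 (by omega)
    exact (c1.trans (c2.trans c3) : _)

theorem newton_spec (r : Int) (hr : r % 2 = 1) (k : Nat) (hk : 1 ≤ k) :
    0 ≤ inv_odd_mod_2k r (k : Int) ∧ inv_odd_mod_2k r (k : Int) < 2 ^ k ∧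
      r * inv_odd_mod_2k r (k : Int) % 2 ^ k = 1 % 2 ^ k := by
  obtain ⟨h0, h1, hcong⟩ := newton_fold r hr k hk
  have e : inv_odd_mod_2k r (k : Int) = newtonF r k := by
    show PySem.Int.mod (newtonF r k) ((1 : Int) <<< ((k : Int)).toNat) = newtonF r k
    rw [show ((k : Int)).toNat = k from Int.toNat_natCast k, pvShl]
    rw [PySem.Int.mod_eq_emod_of_pos (by positivity : (0 : Int) < 2 ^ k)]
    exact Int.emod_eq_of_lt h0 h1
  rw [e]
  exact ⟨h0, h1, hcong⟩

-- ---- uniqueness of the odd inverse mod 2^k, and the gcd form of it ----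

theorem two_pow_dvd_cancel (k : Nat) :
    ∀ r d : Int, r % 2 = 1 → (2 ^ k : Int) ∣ r * d → (2 ^ k : Int) ∣ d := by
  induction k with
  | zero => intro r d _ _; simpa using one_dvd d
  | succ k ih =>
    intro r d hr hdvd
    have h2 : (2 : Int) ∣ r * d := dvd_trans (by exact dvd_pow_self 2 (Nat.succ_ne_zero k)) hdvd
    have h2d : (2 : Int) ∣ d := by
      rcases (Int.prime_two.dvd_mul.mp h2) with h | h
      · exfalso; obtain ⟨c, hc⟩ := h; omega
      · exact h
    obtain ⟨e, rfl⟩ := h2d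
    have he : (2 ^ k : Int) ∣ r * e := by
      have h' : 2 * (2 ^ k : Int) ∣ 2 * (r * e) := by
        have e2 : r * (2 * e) = 2 * (r * e) := by ring
        rw [← e2, ← pow_succ']
        exact hdvd
      exact (mul_dvd_mul_iff_left (by norm_num : (2 : Int) ≠ 0)).mp h'
    rw [pow_succ']
    exact mul_dvd_mul_left 2 (ih r e hr he)

theorem pvInvUnique (k : Nat) (r x y : Int) (hr : r % 2 = 1)
    (hx0 : 0 ≤ x) (hx1 : x < 2 ^ k) (hy0 : 0 ≤ y) (hy1 : y < 2 ^ k)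
    (h1 : r * x % 2 ^ k = 1 % 2 ^ k) (h2 : r * y % 2 ^ k = 1 % 2 ^ k) : x = y := by
  have hmod : r * x ≡ r * y [ZMOD (2 ^ k : Int)] := h1.trans h2.symm
  have hdvd : (2 ^ k : Int) ∣ r * (y - x) := by
    have := hmod.dvd
    have e : r * y - r * x = r * (y - x) := by ring
    rwa [e] at this
  have hd : (2 ^ k : Int) ∣ y - x := two_pow_dvd_cancel k r (y - x) hr hdvd
  have : y - x = 0 := Int.eq_zero_of_abs_lt_dvd hd (abs_lt.mpr ⟨by linarith, by linarith⟩)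
  omega

theorem gcdA_inv (d : Int) (k : Nat) (hd : d % 2 = 1) :
    d * (Int.gcdA d (2 ^ k) % 2 ^ k) % 2 ^ k = 1 % 2 ^ k := by
  have hgcd2 : Nat.gcd d.natAbs 2 = 1 := by
    have : d.natAbs % 2 = 1 := by omega
    rw [Nat.gcd_comm, Nat.gcd_rec, this]
    simp
  have hgcd : Int.gcd d (2 ^ k) = 1 := by
    have habs : ((2 : Int) ^ k).natAbs = 2 ^ k := by simp [Int.natAbs_pow]
    have e : Int.gcd d (2 ^ k) = Nat.gcd d.natAbs (2 ^ k) := by rw [Int.gcd, habs]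
    rw [e]
    exact Nat.Coprime.pow_right k hgcd2
  have hb := Int.gcd_eq_gcd_ab d (2 ^ k)
  rw [hgcd] at hb
  have h1 : d * Int.gcdA d (2 ^ k) ≡ 1 [ZMOD (2 ^ k : Int)] := by
    rw [Int.modEq_iff_dvd]
    have e : d * Int.gcdA d (2 ^ k) - 1 = -(2 ^ k * Int.gcdB d (2 ^ k)) := by
      push_cast at hb
      linarith
    rw [show (1 : Int) - d * Int.gcdA d (2 ^ k) = 2 ^ k * Int.gcdB d (2 ^ k) by linarith [e]]
    exact Dvd.intro _ rfl
  exact ((Int.ModEq.refl d).mul (pvEmodMod (Int.gcdA d (2 ^ k)) (2 ^ k))).trans h1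

-- ---- tz and stripTwos both find the 2-adic valuation ----

theorem and_pred_self (v : Nat) : ∀ d : Nat, d % 2 = 1 →
    2 ^ v * d - (2 ^ v * d &&& (2 ^ v * d - 1)) = 2 ^ v := by
  induction v with
  | zero =>
    intro d hd
    have hmod : (d &&& (d - 1)) % 2 = 0 := by
      rw [← Nat.and_one_is_mod, Nat.and_assoc, Nat.and_one_is_mod,
        show (d - 1) % 2 = 0 by omega, Nat.and_zero]
    have hdiv : (d &&& (d - 1)) / 2 = d / 2 := by
      rw [Nat.and_div_two, show (d - 1) / 2 = d / 2 by omega, Nat.and_self]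
    have := Nat.div_add_mod (d &&& (d - 1)) 2
    simp only [pow_zero, one_mul]
    omega
  | succ v ih =>
    intro d hd
    have hm1 : 1 ≤ 2 ^ v * d := Nat.mul_pos (pow_pos two_pos v) (by omega)
    have hs : 2 ^ (v + 1) * d = 2 * (2 ^ v * d) := by ring
    have hmod : (2 ^ (v + 1) * d &&& (2 ^ (v + 1) * d - 1)) % 2 = 0 := by
      rw [← Nat.and_one_is_mod, Nat.and_assoc, Nat.and_one_is_mod,
        show (2 ^ (v + 1) * d - 1) % 2 = 1 by rw [hs]; omega, Nat.and_one_is_mod]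
      rw [hs]; omega
    have hdiv : (2 ^ (v + 1) * d &&& (2 ^ (v + 1) * d - 1)) / 2
        = (2 ^ v * d &&& (2 ^ v * d - 1)) := by
      rw [Nat.and_div_two, hs, show 2 * (2 ^ v * d) / 2 = 2 ^ v * d by omega,
        show (2 * (2 ^ v * d) - 1) / 2 = 2 ^ v * d - 1 by omega]
      
    have hle : (2 ^ v * d &&& (2 ^ v * d - 1)) ≤ 2 ^ v * d := Nat.and_le_left
    have ihv := ih d hd
    have := Nat.div_add_mod (2 ^ (v + 1) * d &&& (2 ^ (v + 1) * d - 1)) 2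
    have hp : 2 ^ (v + 1) = 2 * 2 ^ v := by ring
    omega

theorem band_self_neg (x : Int) (hx : 0 < x) :
    PySem.Int.band x (-x) = ((x.toNat - (x.toNat &&& (x.toNat - 1)) : Nat) : Int) := by
  rw [PySem.Int.band]
  rw [if_pos (le_of_lt hx), if_neg (by omega : ¬ (0 : Int) ≤ -x)]
  have e : - -x - 1 = x - 1 := by ring
  rw [e, show (x - 1).toNat = x.toNat - 1 by omega]

theorem bitLength_two_pow (v : Nat) : PySem.Int.bitLength ((2 ^ v : Nat) : Int) = v + 1 := by
  induction v with
  | zero => norm_num; decide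
  | succ v ih =>
    rw [PySem.Int.bitLength_natCast (pow_pos two_pos (v + 1)),
      show 2 ^ (v + 1) / 2 = 2 ^ v by rw [pow_succ]; omega, ih]

theorem tz_spec (v d : Nat) (hd : d % 2 = 1) : tz ((2 ^ v * d : Nat) : Int) = (v : Int) := by
  have hpos : (0 : Int) < ((2 ^ v * d : Nat) : Int) := by
    have : 0 < 2 ^ v * d := Nat.mul_pos (pow_pos two_pos v) (by omega)
    exact_mod_cast this
  rw [tz, if_neg (by omega : ¬ ((2 ^ v * d : Nat) : Int) = 0)]
  rw [band_self_neg _ hpos]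
  rw [show ((2 ^ v * d : Nat) : Int).toNat = 2 ^ v * d from Int.toNat_natCast _]
  rw [and_pred_self v d hd, bitLength_two_pow]
  push_cast
  ring

theorem stripTwos_spec (v : Nat) : ∀ d v0 : Nat, d % 2 = 1 →
    stripTwos (2 ^ v * d) v0 = (d, v0 + v) := by
  induction v with
  | zero =>
    intro d v0 hd
    rw [stripTwos, if_neg (by omega)]
    simp
  | succ v ih =>
    intro d v0 hd
    have hne : 2 ^ (v + 1) * d ≠ 0 := Nat.pos_iff_ne_zero.mp (Nat.mul_pos (pow_pos two_pos (v + 1)) (by omega))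
    have heven : 2 ^ (v + 1) * d % 2 = 0 := by
      have : 2 ^ (v + 1) * d = 2 * (2 ^ v * d) := by ring
      omega
    rw [stripTwos, if_pos ⟨hne, heven⟩]
    rw [show 2 ^ (v + 1) * d / 2 = 2 ^ v * d by
      have : 2 ^ (v + 1) * d = 2 * (2 ^ v * d) := by ring
      omega]
    rw [ih d (v0 + 1) hd]
    refine Prod.ext rfl ?_
    show v0 + 1 + v = v0 + (v + 1)
    omega

-- ---- the shape of A's final filtering loop ----

theorem foldA_nil (F : Int → Int) (l : List Int) (acc : List Int)
    (h : ∀ t ∈ l, PySem.Int.band (F t) 1 = 0) :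
    l.foldl (fun cands t => if PySem.Int.band (F t) 1 ≠ 0 then cands ++ [F t] else cands) acc
      = acc := by
  induction l generalizing acc with
  | nil => rfl
  | cons x xs ih =>
    simp only [List.foldl_cons]
    rw [if_neg (by simp [h x (List.mem_cons_self)])]
    exact ih acc (fun t ht => h t (List.mem_cons_of_mem x ht))

theorem foldA_all (F : Int → Int) (l : List Int) (acc : List Int)
    (h : ∀ t ∈ l, PySem.Int.band (F t) 1 ≠ 0) :
    l.foldl (fun cands t => if PySem.Int.band (F t) 1 ≠ 0 then cands ++ [F t] else cands) acc
      = acc ++ l.map F := by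
  induction l generalizing acc with
  | nil => simp
  | cons x xs ih =>
    simp only [List.foldl_cons, List.map_cons]
    rw [if_pos (h x (List.mem_cons_self))]
    rw [ih (acc ++ [F x]) (fun t ht => h t (List.mem_cons_of_mem x ht))]
    simp

theorem pvBandMask (x : Int) (h0 : 0 ≤ x) (h1 : x < 2 ^ 64) :
    PySem.Int.band x MASK64 = x := by
  have hm0 : (0 : Int) ≤ MASK64 := by decide
  rw [PySem.Int.band_of_nonneg h0 hm0]
  have hmt : MASK64.toNat = 2 ^ 64 - 1 := by decide
  rw [hmt, Nat.and_two_pow_sub_one_eq_mod, Nat.mod_eq_of_lt (by omega), Int.toNat_of_nonneg h0]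

theorem pvParity (c t : Int) (k : Nat) (hk : 1 ≤ k) : (c + t * 2 ^ k) % 2 = c % 2 := by
  have e : (2 : Int) ^ k = 2 ^ (k - 1) * 2 := by rw [← pow_succ]; congr 1; omega
  rw [e, ← mul_assoc, Int.add_mul_emod_self_right]

theorem tailA_S0 (a z0 z1 n : Int)
    (hgeom : geom_sum_mod a n ((1 : Int) <<< (64 : Nat)) = 0) :
    recover_c_lifts a z0 z1 n = [] := by
  simp only [recover_c_lifts]
  rw [hgeom]
  have htz : tz 0 = 64 := rfl
  rw [htz]
  norm_num

theorem pv_main : ∀ (a z0 z1 n : Int), Pre_recover_c_lifts a z0 z1 n →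
    recover_c_lifts a z0 z1 n = recover_c_lifts_alt a z0 z1 n := by
  intro a z0 z1 n hpre
  by_cases hn : n ≤ 0
  · rw [tailA_S0 a z0 z1 n (geom_sum_nonpos a n _ hn)]
    unfold recover_c_lifts_alt
    rw [if_pos hn]
  · have hn1 : 0 < n := by omega
    set m : Nat := n.toNat with hmdef
    have hm1 : 1 ≤ m := by omega
    have hncast : (m : Int) = n := Int.toNat_of_nonneg (by omega)
    have hMpos : (0 : Int) < 2 ^ 64 := by positivity
    have hMpos' : (0 : Int) < (1 : Int) <<< (64 : Nat) := by rw [pvShl]; positivity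
    have hmod64 : PySem.Int.mod a ((1 : Int) <<< (64 : Nat)) = a % 2 ^ 64 := by
      rw [pvShl, PySem.Int.mod_eq_emod_of_pos hMpos]
    have hgeom : geom_sum_mod a n ((1 : Int) <<< (64 : Nat)) = gsum a m % 2 ^ 64 := by
      rw [← hncast]; exact pvGeomSumEq a m
    have hpowA : pyPowMod64 a n = a ^ m % 2 ^ 64 := by
      unfold pyPowMod64
      rw [if_pos (by omega : (0 : Int) ≤ n)]
      simp only [PySem.Int.powMod, pvShl, PySem.Int.mod_eq_emod_of_pos hMpos]
      rfl
    have hPG : powGeom (PySem.Int.mod a ((1 : Int) <<< (64 : Nat))) ((1 : Int) <<< (64 : Nat)) m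
        = (a ^ m % 2 ^ 64, gsum a m % 2 ^ 64) := by
      rw [powGeom_spec _ _ hMpos' m, hmod64]
      simp only [pvShl]
      refine Prod.ext ?_ ?_
      · exact Int.ModEq.pow m (pvEmodMod a (2 ^ 64))
      · exact gsum_congr _ _ _ (pvEmodMod a (2 ^ 64)) m
    have hBeq : (z1 - (a ^ m % 2 ^ 64) * z0 % 2 ^ 64) % 2 ^ 64
        = (z1 - (a ^ m % 2 ^ 64) * z0) % 2 ^ 64 :=
      ((Int.ModEq.refl z1).sub (pvEmodMod ((a ^ m % 2 ^ 64) * z0) (2 ^ 64)) : _)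
    set S : Int := gsum a m % 2 ^ 64 with hSdef
    set B : Int := (z1 - (a ^ m % 2 ^ 64) * z0) % 2 ^ 64 with hBdef
    have hS0 : 0 ≤ S := Int.emod_nonneg _ (by positivity)
    have hS1 : S < 2 ^ 64 := Int.emod_lt_of_pos _ hMpos
    have hB0 : 0 ≤ B := Int.emod_nonneg _ (by positivity)
    have hB1 : B < 2 ^ 64 := Int.emod_lt_of_pos _ hMpos
    by_cases hSz : S = 0
    · rw [tailA_S0 a z0 z1 n (hgeom.trans hSz)]
      simp only [recover_c_lifts_alt]
      rw [if_neg hn, hPG]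
      simp [hSz]
    · -- S ≠ 0 : the real case
      simp only [recover_c_lifts, recover_c_lifts_alt]
      rw [if_neg hn, hPG, hgeom, hpowA]
      simp only [pvShl, PySem.Int.mod_eq_emod_of_pos hMpos]
      rw [hBeq, ← hBdef]
      rw [if_neg hSz]
      -- decompose S.toNat = 2^v * d with d odd
      obtain ⟨v, d, hoddd, hsd⟩ := Nat.exists_eq_two_pow_mul_odd (n := S.toNat) (by omega)
      have hdodd : d % 2 = 1 := Nat.odd_iff.mp hoddd
      have hScast : ((S.toNat : Nat) : Int) = S := Int.toNat_of_nonneg hS0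
      have hSfac : S = ((2 ^ v * d : Nat) : Int) := by rw [← hsd, hScast]
      have hsl : 2 ^ v * d < 2 ^ 64 := by
        have h1 : S.toNat < 2 ^ 64 := by omega
        rwa [hsd] at h1
      have hv63 : v < 64 := by
        have h2v : (2 : Nat) ^ v ≤ 2 ^ v * d := Nat.le_mul_of_pos_right _ (by omega)
        have h2 : (2 : Nat) ^ v < 2 ^ 64 := lt_of_le_of_lt h2v hsl
        exact (Nat.pow_lt_pow_iff_right (by norm_num)).mp h2
      set k : Nat := 64 - v with hkdef
      have hk1 : 1 ≤ k := by omega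
      have hvk : v + k = 64 := by omega
      have h2vk : (2 : Int) ^ v * 2 ^ k = 2 ^ 64 := by rw [← pow_add, hvk]
      have htz : tz S = (v : Int) := by rw [hSfac]; exact tz_spec v d hdodd
      have hstrip : stripTwos S.toNat 0 = (d, v) := by
        rw [hsd]
        simpa using stripTwos_spec v d 0 hdodd
      rw [htz]
      simp only [hstrip, Int.toNat_natCast]
      -- first guard on both sides
      rw [show (64 - v : Nat) = k from hkdef.symm]
      by_cases hBm : PySem.Int.band B ((2 : Int) ^ v - 1) = 0
      · rw [if_neg (show ¬((v : Int) > 0 ∧ PySem.Int.band B ((2 : Int) ^ v - 1) ≠ 0) by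
          simp [hBm])]
        rw [if_neg (show ¬PySem.Int.band B ((2 : Int) ^ v - 1) ≠ 0 by simp [hBm])]
        -- second guard of A: k ≠ 0
        rw [if_neg (show ¬(64 : Int) - (v : Nat) = 0 by omega)]
        have hkt : ((64 : Int) - (v : Nat)).toNat = k := by omega
        have hki : (64 : Int) - (v : Nat) = (k : Nat) := by omega
        rw [hkt, hki]
        -- S >>> v = d, and its reduction mod 2^k is d itself
        have hshiftS : S >>> v = (d : Int) := by
          rw [hSfac, Int.shiftRight_eq_div_pow, ← Int.natCast_ediv]
          norm_num [Nat.mul_div_cancel_left d (pow_pos two_pos v)]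
        have hdk : d < 2 ^ k := by
          have := hsl
          rw [show (2 : Nat) ^ 64 = 2 ^ v * 2 ^ k by rw [← pow_add, hvk]] at this
          exact Nat.lt_of_mul_lt_mul_left this
        have hSred : PySem.Int.mod ((d : Int)) (2 ^ k) = (d : Int) := by
          rw [PySem.Int.mod_eq_emod_of_pos (by positivity)]
          exact Int.emod_eq_of_lt (by positivity) (by exact_mod_cast hdk)
        rw [hshiftS, hSred]
        have hdodd' : (d : Int) % 2 = 1 := by omega
        -- A's oddness check on S_red passes
        rw [if_neg (show ¬PySem.Int.band ((d : Int)) 1 = 0 by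
          rw [PySem.Int.band_one, PySem.Int.mod_eq_emod_of_pos (by norm_num : (0 : Int) < 2)]
          omega)]
        -- the two inverses agree
        have hnewton := newton_spec (d : Int) hdodd' k hk1
        have hgA := gcdA_inv (d : Int) k hdodd'
        have hinveq : inv_odd_mod_2k (d : Int) ((k : Nat) : Int)
            = Int.gcdA (d : Int) (2 ^ k) % 2 ^ k :=
          pvInvUnique k (d : Int) _ _ hdodd' hnewton.1 hnewton.2.1
            (Int.emod_nonneg _ (by positivity)) (Int.emod_lt_of_pos _ (by positivity))
            hnewton.2.2 hgA
        simp only [hinveq, PySem.Int.mod_eq_emod_of_pos (show (0 : Int) < 2 ^ k by positivity)]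
        set c : Int := B >>> v * (Int.gcdA (d : Int) (2 ^ k) % 2 ^ k) % 2 ^ k with hcdef
        have hc0 : 0 ≤ c := Int.emod_nonneg _ (by positivity)
        have hck : c < 2 ^ k := Int.emod_lt_of_pos _ (by positivity)
        -- per-element facts about A's loop body
        have hFt : ∀ t ∈ PySem.List.pyRange 0 ((2 : Int) ^ v) 1,
            PySem.Int.band (c + t <<< k) MASK64 = c + t * 2 ^ k ∧
              PySem.Int.band (PySem.Int.band (c + t <<< k) MASK64) 1 = c % 2 := by
          intro t ht
          obtain ⟨ht0, ht1⟩ := PySem.List.mem_pyRange_one.mp ht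
          have hshl : t <<< k = t * 2 ^ k := Int.shiftLeft_eq t k
          have hbound0 : 0 ≤ c + t * 2 ^ k := add_nonneg hc0 (mul_nonneg ht0 (by positivity))
          have hbound1 : c + t * 2 ^ k < 2 ^ 64 := by
            have : t * 2 ^ k ≤ ((2 : Int) ^ v - 1) * 2 ^ k := by
              have := Int.mul_le_mul_of_nonneg_right (by omega : t ≤ (2 : Int) ^ v - 1)
                (by positivity : (0 : Int) ≤ 2 ^ k)
              linarith
            nlinarith [h2vk]
          constructor
          · rw [hshl]; exact pvBandMask _ hbound0 hbound1
          · rw [hshl, pvBandMask _ hbound0 hbound1, PySem.Int.band_one,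
              PySem.Int.mod_eq_emod_of_pos (by norm_num : (0 : Int) < 2), pvParity c t k hk1]
        by_cases hc2 : c % 2 = 0
        · -- even base: A's loop keeps nothing, B returns []
          rw [if_pos (show PySem.Int.band c 1 = 0 by
            rw [PySem.Int.band_one, PySem.Int.mod_eq_emod_of_pos (by norm_num : (0 : Int) < 2)]
            exact hc2)]
          exact foldA_nil _ _ _ (fun t ht => by rw [(hFt t ht).2]; exact hc2)
        · rw [if_neg (show ¬PySem.Int.band c 1 = 0 by
            rw [PySem.Int.band_one, PySem.Int.mod_eq_emod_of_pos (by norm_num : (0 : Int) < 2)]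
            exact hc2)]
          rw [foldA_all _ _ _ (fun t ht => by rw [(hFt t ht).2]; exact hc2)]
          rw [List.nil_append]
          refine List.map_congr_left ?_
          intro t ht
          rw [(hFt t ht).1, Int.shiftLeft_eq t k]
      · -- mask rejects B: both sides return []
        have hv0 : 0 < v := by
          by_contra hv
          have hv' : v = 0 := by omega
          rw [hv'] at hBm
          simp [PySem.Int.band_zero] at hBm
        rw [if_pos ⟨by exact_mod_cast hv0, hBm⟩, if_pos hBm]

-- ===== VERDICT (by name: the statement is the Claim_ definition above) =====
theorem recover_c_lifts_spec : Claim_equal_recover_c_lifts := by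
  intro a z0 z1 n _ hpre
  exact pv_main a z0 z1 n hpre
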